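-- pv_equiv track=rewrite | github.com/Appypaw/algorithmStudy | Programmers/Basic/D14_n보다 커질 때까지 더하기.py | solution
-- ===== SOURCE A (Python) =====
-- def solution(numbers, n):
--     sum_list = []
--     temp = 0
--     for i in numbers:
--         temp += i
--         sum_list.append(temp)
--
--     for j in sum_list:
--         if j > n:
--             return j
-- ===== SOURCE B (Python) =====
-- def solution(numbers, n):
--     temp = 0
--     for i in numbers:
--         temp += i
--         if temp > n:
--             return temp
-- ===== Notes on version B (the rewrite author's own statement) =====
-- stated objective: simpler
-- what changed: B fuses the two passes into one loop over numbers maintaining only a scalar running total and returning as soon as it exceeds n, instead of materializing the full prefix-sum list and then scanning it.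
import Mathlib
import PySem

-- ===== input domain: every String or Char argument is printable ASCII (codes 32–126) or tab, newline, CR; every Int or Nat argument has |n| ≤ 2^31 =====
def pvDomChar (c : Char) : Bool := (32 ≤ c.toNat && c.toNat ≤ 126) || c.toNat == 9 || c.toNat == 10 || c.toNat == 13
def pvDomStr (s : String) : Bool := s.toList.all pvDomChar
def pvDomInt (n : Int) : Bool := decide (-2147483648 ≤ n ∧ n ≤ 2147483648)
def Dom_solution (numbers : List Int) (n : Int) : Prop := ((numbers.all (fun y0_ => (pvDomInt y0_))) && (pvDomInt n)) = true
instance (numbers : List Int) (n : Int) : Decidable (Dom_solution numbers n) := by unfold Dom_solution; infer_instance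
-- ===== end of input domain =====

-- B fuses A's two passes into one running-total loop (simpler, no prefix-sum list).
-- Pre_solution excludes inputs where no prefix sum exceeds n: there Python A returns None, not an int.
-- ===== PORT A =====
-- first loop: build sum_list with a running temp
def pvSums (numbers : List Int) (sum_list : List Int) (temp : Int) : List Int :=
  match numbers with
  | [] => sum_list
  | i :: rest => pvSums rest (sum_list ++ [temp + i]) (temp + i)

-- second loop: return the first j > n (0 stands for Python's implicit None, excluded by Pre_)
def pvFind (l : List Int) (n : Int) : Int :=
  match l with
  | [] => 0
  | j :: rest => if j > n then j else pvFind rest n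

def solution (numbers : List Int) (n : Int) : Int :=
  pvFind (pvSums numbers [] 0) n

-- ===== PORT B =====
def pvAltLoop (numbers : List Int) (temp : Int) (n : Int) : Int :=
  match numbers with
  | [] => 0
  | i :: rest => if temp + i > n then temp + i else pvAltLoop rest (temp + i) n

def solution_alt (numbers : List Int) (n : Int) : Int :=
  pvAltLoop numbers 0 n

-- ===== PRECONDITION & SPEC =====
-- Pre_: some prefix sum of numbers exceeds n; otherwise Python A falls off both loops and returns None (not an int).
def Pre_solution (numbers : List Int) (n : Int) : Prop :=
  ∃ k ∈ List.range numbers.length, ((numbers.take (k + 1)).sum) > n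
instance (numbers : List Int) (n : Int) : Decidable (Pre_solution numbers n) := by unfold Pre_solution; infer_instance
def pvWitness_solution : List Int × Int := ([1], 0)

def Spec_solution (numbers : List Int) (n : Int) (out : Int) : Prop := out = solution_alt numbers n
instance (numbers : List Int) (n : Int) (out : Int) : Decidable (Spec_solution numbers n out) := by unfold Spec_solution; infer_instance

-- ===== CLAIM (what is proved, stated in full; the proofs are below) =====
def Claim_equal_solution : Prop := ∀ (numbers : List Int) (n : Int), Dom_solution numbers n → Pre_solution numbers n → Spec_solution numbers n (solution numbers n)

-- ===== LEMMAS AND PROOFS =====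

-- sums built from temp, without the accumulated prefix
def pvSumsFrom (temp : Int) : List Int → List Int
  | [] => []
  | i :: rest => (temp + i) :: pvSumsFrom (temp + i) rest

theorem pvSums_eq (numbers : List Int) : ∀ (acc : List Int) (temp : Int),
    pvSums numbers acc temp = acc ++ pvSumsFrom temp numbers := by
  induction numbers with
  | nil => intro acc temp; simp [pvSums, pvSumsFrom]
  | cons i rest ih =>
      intro acc temp
      simp [pvSums, pvSumsFrom, ih]

theorem pvFind_sumsFrom (numbers : List Int) : ∀ (temp : Int) (n : Int),
    pvFind (pvSumsFrom temp numbers) n = pvAltLoop numbers temp n := by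
  induction numbers with
  | nil => intro temp n; rfl
  | cons i rest ih =>
      intro temp n
      simp only [pvSumsFrom, pvFind, pvAltLoop, ih]

-- ===== VERDICT (by name: the statement is the Claim_ definition above) =====
theorem solution_spec : Claim_equal_solution := by
  intro numbers n _ _
  unfold Spec_solution solution solution_alt
  rw [pvSums_eq, List.nil_append, pvFind_sumsFrom]
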